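-- pv_equiv track=rewrite | github.com/kingaurelio1/PythonCodes | __pycache__/transformarrayparity.py | TransformArrayParity
-- ===== SOURCE A (Python) =====
-- def TransformArrayParity(a):
--     counter=0
--     pointer1=0
--     pointer2=0
--     while pointer1 < len(a):
--         if a[pointer1]%2==0:
--             counter+=1
--             pointer1+=1
--         else:
--             pointer1+=1
--     while pointer2 < len(a):
--         if counter>0:
--             a[pointer2]=0
--             pointer2+=1
--             counter-=1
--         else:
--             a[pointer2]=1
--             pointer2+=1
--     return a
-- ===== SOURCE B (Python) =====
-- def TransformArrayParity(a):
--     a[:] = sorted(x % 2 for x in a)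
--     return a
-- ===== Notes on version B (the rewrite author's own statement) =====
-- stated objective: alternative
-- what changed: Instead of counting evens and then writing zeros followed by ones positionally, B maps every element to its parity bit x % 2 and sorts that bit list, which is correct because sorting a 0/1 list puts exactly the zeros (one per even element) first.
import Mathlib
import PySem

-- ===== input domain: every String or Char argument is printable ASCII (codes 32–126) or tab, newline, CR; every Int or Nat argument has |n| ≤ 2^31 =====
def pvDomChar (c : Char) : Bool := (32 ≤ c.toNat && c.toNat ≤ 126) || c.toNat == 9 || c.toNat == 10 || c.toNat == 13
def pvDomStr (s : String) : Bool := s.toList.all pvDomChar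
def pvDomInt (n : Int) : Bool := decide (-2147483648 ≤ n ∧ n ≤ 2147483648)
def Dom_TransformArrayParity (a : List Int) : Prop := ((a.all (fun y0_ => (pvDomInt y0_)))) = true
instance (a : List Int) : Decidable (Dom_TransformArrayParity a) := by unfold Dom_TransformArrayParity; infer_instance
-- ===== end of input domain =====

-- B sorts the list of parity bits x % 2 instead of counting evens and writing blocks; like A it
-- mutates the caller's list in place (via slice assignment), and the equivalence proved is about the return value.

-- ===== PORT A =====
-- first while loop: count evens, advancing pointer1 over the list
def pvCountLoop (a : List Int) (counter : Int) : Int :=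
  a.foldl (fun c x => if PySem.Int.mod x 2 == 0 then c + 1 else c) counter

-- second while loop: walk pointer2 over the list, writing 0 while counter>0 else 1
def pvWriteLoop (counter : Int) : List Int → List Int
  | [] => []
  | _ :: t => if counter > 0 then 0 :: pvWriteLoop (counter - 1) t
              else 1 :: pvWriteLoop counter t

def TransformArrayParity (a : List Int) : List Int :=
  pvWriteLoop (pvCountLoop a 0) a

-- ===== PORT B =====
def TransformArrayParity_alt (a : List Int) : List Int :=
  PySem.List.sorted (a.map (fun x => PySem.Int.mod x 2)) (fun x => x) false

-- ===== PRECONDITION & SPEC =====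
def Spec_TransformArrayParity (a : List Int) (out : List Int) : Prop := out = TransformArrayParity_alt a
instance (a : List Int) (out : List Int) : Decidable (Spec_TransformArrayParity a out) := by unfold Spec_TransformArrayParity; infer_instance

-- ===== CLAIM (what is proved, stated in full; the proofs are below) =====
def Claim_equal_TransformArrayParity : Prop := ∀ (a : List Int), Dom_TransformArrayParity a → Spec_TransformArrayParity a (TransformArrayParity a)

-- ===== LEMMAS AND PROOFS =====

theorem pvMod2_cases (x : Int) : PySem.Int.mod x 2 = 0 ∨ PySem.Int.mod x 2 = 1 := by
  have h1 := PySem.Int.mod_nonneg x (b := 2) (by norm_num)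
  have h2 := PySem.Int.mod_lt x (b := 2) (by norm_num)
  omega

theorem pvCountLoop_eq (a : List Int) (c : Int) :
    pvCountLoop a c = c + ((a.filter (fun x => PySem.Int.mod x 2 == 0)).length : Int) := by
  induction a generalizing c with
  | nil => simp [pvCountLoop]
  | cons h t ih =>
    rw [show pvCountLoop (h :: t) c
        = pvCountLoop t (if PySem.Int.mod h 2 == 0 then c + 1 else c) from rfl]
    by_cases hh : PySem.Int.mod h 2 == 0 <;>
      simp only [hh, if_true, if_false, Bool.false_eq_true, ih, List.filter_cons,
        List.length_cons] <;> push_cast <;> ring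

theorem pvWriteLoop_eq (a : List Int) (k : Nat) (hk : k ≤ a.length) :
    pvWriteLoop (k : Int) a = List.replicate k 0 ++ List.replicate (a.length - k) 1 := by
  induction a generalizing k with
  | nil =>
    simp at hk; subst hk; simp [pvWriteLoop]
  | cons h t ih =>
    cases k with
    | zero =>
      simp only [pvWriteLoop]
      rw [if_neg (by omega)]
      have h0 : pvWriteLoop ((0 : Nat) : Int) t = List.replicate 0 0 ++ List.replicate (t.length - 0) 1 :=
        ih 0 (Nat.zero_le _)
      simp only [Int.natCast_zero] at h0 ⊢
      rw [h0]; simp [List.replicate_succ]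
    | succ n =>
      simp only [pvWriteLoop]
      rw [if_pos (by push_cast; omega)]
      have hn : n ≤ t.length := by simpa using Nat.succ_le_succ_iff.mp hk
      rw [show ((n + 1 : Nat) : Int) - 1 = (n : Int) by push_cast; ring, ih n hn]
      simp [List.replicate_succ, Nat.succ_sub_succ]

-- a 0/1 list is a permutation of (its zeros, then its ones)
theorem pvPerm_blocks (l : List Int) (h : ∀ x ∈ l, x = 0 ∨ x = 1) :
    (List.replicate (l.count (0 : Int)) (0 : Int)
      ++ List.replicate (l.length - l.count (0 : Int)) (1 : Int)).Perm l := by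
  induction l with
  | nil => simp
  | cons x t ih =>
    have ht : ∀ y ∈ t, y = 0 ∨ y = 1 := fun y hy => h y (List.mem_cons_of_mem _ hy)
    have hle : t.count (0 : Int) ≤ t.length := List.count_le_length
    rcases h x (List.mem_cons_self) with hx | hx <;> subst hx
    · rw [show ((0 : Int) :: t).count (0 : Int) = t.count (0 : Int) + 1 by simp [List.count_cons]]
      rw [show ((0 : Int) :: t).length - (t.count (0 : Int) + 1) = t.length - t.count (0 : Int) by
        simp only [List.length_cons]; omega]
      simpa [List.replicate_succ] using (ih ht).cons 0
    · rw [show ((1 : Int) :: t).count (0 : Int) = t.count (0 : Int) by simp [List.count_cons]]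
      rw [show ((1 : Int) :: t).length - t.count (0 : Int) = (t.length - t.count (0 : Int)) + 1 by
        simp only [List.length_cons]; omega]
      refine List.Perm.trans ?_ ((ih ht).cons 1)
      rw [show List.replicate (t.length - t.count (0 : Int) + 1) (1 : Int)
          = (1 : Int) :: List.replicate (t.length - t.count (0 : Int)) 1 from rfl]
      exact List.perm_middle

theorem pvBlocks_pairwise (m n : Nat) :
    (List.replicate m (0 : Int) ++ List.replicate n 1).Pairwise (· ≤ ·) := by
  rw [List.pairwise_append]
  refine ⟨List.pairwise_replicate.mpr (by simp), List.pairwise_replicate.mpr (by simp), ?_⟩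
  intro x hx y hy
  rw [List.eq_of_mem_replicate hx, List.eq_of_mem_replicate hy]; norm_num

theorem pvCount_zero_eq_filter (a : List Int) :
    (a.map (fun x => PySem.Int.mod x 2)).count 0
      = (a.filter (fun x => PySem.Int.mod x 2 == 0)).length := by
  induction a with
  | nil => simp
  | cons h t ih =>
    simp only [List.map_cons, List.filter_cons]
    rcases pvMod2_cases h with hh | hh
    · rw [hh, if_pos (by decide), List.count_cons, List.length_cons, ih]
      simp
    · rw [hh, if_neg (by decide), List.count_cons, ih]
      simp

-- ===== VERDICT (by name: the statement is the Claim_ definition above) =====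
theorem TransformArrayParity_spec : Claim_equal_TransformArrayParity := by
  intro a _
  unfold Spec_TransformArrayParity TransformArrayParity TransformArrayParity_alt
  set l := a.map (fun x => PySem.Int.mod x 2) with hl
  have h01 : ∀ x ∈ l, x = 0 ∨ x = 1 := by
    intro x hx
    rcases List.mem_map.mp hx with ⟨y, _, rfl⟩
    exact pvMod2_cases y
  have hsorted : PySem.List.sorted l (fun x => x) false
      = List.replicate (l.count (0 : Int)) 0 ++ List.replicate (l.length - l.count (0 : Int)) 1 :=
    PySem.List.sorted_id_eq_of_perm_of_pairwise _ _ (pvPerm_blocks l h01) (pvBlocks_pairwise _ _)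
  have hc : pvCountLoop a 0 = ((a.filter (fun x => PySem.Int.mod x 2 == 0)).length : Int) := by
    rw [pvCountLoop_eq]; ring
  rw [hsorted, hc, pvWriteLoop_eq a _ (List.length_filter_le _ _),
    pvCount_zero_eq_filter, hl, List.length_map]
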